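-- pv_equiv track=rewrite | github.com/paul-schwendenman/advent-of-code | 2024/day17.py | solve
-- ===== SOURCE A (Python) =====
-- def get_output(a):
--     return ((((a % 8) ^ 1) ^ (a >> ((a % 8) ^ 1))) ^ 4) % 8
--
-- def run(a):
--     outs = []
--
--     while a > 0:
--         outs.append(get_output(a))
--         a = a >> 3
--
--     return ','.join(map(str, outs))
--
-- def solve(program, a):
--     meta_inputs = { 0 }
--
--     for num in reversed(program):
--         new_meta_inputs = set()
--
--         for current_number in meta_inputs:
--             for new_segment in range(8):
--                 new_number = (current_number << 3) + new_segment
--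
--                 if get_output(new_number) == num:
--                     new_meta_inputs.add(new_number)
--
--         meta_inputs = new_meta_inputs
--
--     return run(a), min(meta_inputs)
-- ===== SOURCE B (Python) =====
-- def get_output(a):
--     return ((((a % 8) ^ 1) ^ (a >> ((a % 8) ^ 1))) ^ 4) % 8
--
-- def run(a):
--     outs = []
--
--     while a > 0:
--         outs.append(get_output(a))
--         a = a >> 3
--
--     return ','.join(map(str, outs))
--
-- def solve(program, a):
--     def find(idx, cur):
--         if idx < 0:
--             return [cur]
--         res = []
--         for seg in range(8):
--             na = (cur << 3) + seg
--             if get_output(na) == program[idx]: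
--                 res.extend(find(idx - 1, na))
--         return res
--
--     return run(a), min(find(len(program) - 1, 0))
-- ===== Notes on version B (the rewrite author's own statement) =====
-- stated objective: alternative
-- what changed: Replaces A's iterative level-by-level expansion of a set of partial candidates with a recursive depth-first search over program indices that collects all full-length candidates in a list and takes their minimum.
import Mathlib
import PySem

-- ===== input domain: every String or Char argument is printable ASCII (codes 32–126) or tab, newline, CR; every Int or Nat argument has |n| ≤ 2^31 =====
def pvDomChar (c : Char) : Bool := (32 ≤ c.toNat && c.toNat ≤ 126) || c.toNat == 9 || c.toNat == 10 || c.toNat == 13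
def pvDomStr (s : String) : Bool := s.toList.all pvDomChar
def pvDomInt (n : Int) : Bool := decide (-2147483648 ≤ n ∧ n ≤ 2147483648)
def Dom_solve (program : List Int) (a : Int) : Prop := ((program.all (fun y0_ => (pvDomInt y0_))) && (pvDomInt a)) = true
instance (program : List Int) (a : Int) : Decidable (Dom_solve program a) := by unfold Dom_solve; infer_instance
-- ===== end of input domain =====

-- B replaces A's level-by-level set expansion with a recursive depth-first search over program
-- indices (same cost class; objective: alternative decomposition). Helpers get_output/run are
-- identical in both Python sources and are ported once, shared by both ports.

-- ===== PORT A =====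
-- get_output(a): exact Python semantics (Python %, ^, >> via PySem.Int.mod/bxor and Int >>>;
-- the shift amount (a%8)^1 is always in [0,8), so .toNat is exact).
def get_output (a : Int) : Int :=
  PySem.Int.mod
    (PySem.Int.bxor
      (PySem.Int.bxor (PySem.Int.bxor (PySem.Int.mod a 8) 1)
        (a >>> (PySem.Int.bxor (PySem.Int.mod a 8) 1).toNat))
      4) 8

-- the 'while a > 0' loop of run: a strictly shrinks via a >> 3
def runOuts (a : Int) : List Int :=
  if _h : 0 < a then get_output a :: runOuts (a >>> (3:Nat)) else []
  termination_by a.toNat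
  decreasing_by rw [Int.shiftRight_eq_div_pow]; omega

def run (a : Int) : String :=
  PySem.Str.join "," ((runOuts a).map PySem.Int.toStr)

-- the three nested loop bodies of A's solve, as named helpers (innermost first)
def stepSeg (cur num : Int) (nmi2 : PySem.Set Int) (seg : Int) : PySem.Set Int :=
  let nn := (cur <<< (3:Nat)) + seg
  if get_output nn = num then PySem.Set.add nmi2 nn else nmi2

def stepCur (num : Int) (nmi : PySem.Set Int) (cur : Int) : PySem.Set Int :=
  (PySem.List.pyRange 0 8 1).foldl (stepSeg cur num) nmi

def stepNum (mi : PySem.Set Int) (num : Int) : PySem.Set Int :=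
  mi.foldl (stepCur num) PySem.Set.empty

def solve (program : List Int) (a : Int) : String × Int :=
  let mset : PySem.Set Int := program.reverse.foldl stepNum (PySem.Set.ofList [(0:Int)])
  -- min(meta_inputs) raises ValueError on an empty set: those inputs are outside Pre_solve
  (run a, (PySem.List.min? mset (fun x => x)).getD 0)

-- ===== PORT B =====
-- find(idx, cur) of Source B; idx+1 is carried as a Nat (idx < 0 ↔ the Nat is 0); program[idx]
-- is always in range when reached from solve_alt (idx = len-1 … 0), so pyGetD is exact here.
def findAux (program : List Int) : Nat → Int → List Int
  | 0, cur => [cur]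
  | k+1, cur =>
    let num := PySem.List.pyGetD program (k : Int) 0
    (PySem.List.pyRange 0 8 1).foldl
      (fun acc seg =>
        let na := (cur <<< (3:Nat)) + seg
        if get_output na = num then acc ++ findAux program k na else acc)
      []

def solve_alt (program : List Int) (a : Int) : String × Int :=
  -- a is used only through run a; min(...) raises ValueError on an empty candidate list: those inputs are outside Pre_solve
  (run a, (PySem.List.min? (findAux program program.length 0) (fun x => x)).getD 0)

-- ===== PRECONDITION & SPEC =====
-- Pre_solve excludes exactly the inputs on which Python A raises ValueError (min of an empty
-- candidate set): programs that are not producible, i.e. for which no number exists whose 3-bit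
-- prefixes produce the program's outputs.  Producibility is stated as the spec-level predicate
-- "some digit d < 8 extends the accumulated prefix to produce the next output, and the rest of
-- the (reversed) program is producible from there" — the only feasible way to decide
-- nonemptiness (a bounded existential over all 8^len candidates is not evaluable).
def producible : List Int → Int → Bool
  | [], _cur => true
  | num :: rest, cur =>
      (List.range 8).any (fun d =>
        decide (get_output (8 * cur + (d : Int)) = num) && producible rest (8 * cur + (d : Int)))

def Pre_solve (program : List Int) (_a : Int) : Prop := producible program.reverse 0 = true
instance (program : List Int) (a : Int) : Decidable (Pre_solve program a) := by
  unfold Pre_solve; infer_instance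

def pvWitness_solve : List Int × Int := ([5], 7)

def Spec_solve (program : List Int) (a : Int) (out : String × Int) : Prop := out = solve_alt program a
instance (program : List Int) (a : Int) (out : String × Int) : Decidable (Spec_solve program a out) := by unfold Spec_solve; infer_instance

-- ===== CLAIM (what is proved, stated in full; the proofs are below) =====
def Claim_equal_solve : Prop := ∀ (program : List Int) (a : Int), Dom_solve program a → Pre_solve program a → Spec_solve program a (solve program a)

-- ===== LEMMAS AND PROOFS =====

-- the chain condition both searches realise: n is reachable from cur through the nums of L
def good : List Int → Int → Int → Prop
  | [], cur, n => n = cur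
  | num :: rest, cur, n =>
      ∃ seg : Int, seg ∈ PySem.List.pyRange 0 8 1 ∧
        get_output ((cur <<< (3:Nat)) + seg) = num ∧ good rest ((cur <<< (3:Nat)) + seg) n

-- A-side, innermost fold (over the 8 segments), membership characterisation
lemma memInnerA (L : List Int) (acc : PySem.Set Int) (cur num n : Int) :
    n ∈ L.foldl (stepSeg cur num) acc
      ↔ n ∈ acc ∨ ∃ seg ∈ L, get_output ((cur <<< (3:Nat)) + seg) = num ∧ n = (cur <<< (3:Nat)) + seg := by
  induction L generalizing acc with
  | nil => simp
  | cons s t ih =>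
    simp only [List.foldl_cons, ih, stepSeg]
    by_cases hs : get_output ((cur <<< (3:Nat)) + s) = num
    · simp only [hs, if_pos, PySem.Set.mem_add, List.mem_cons]
      constructor
      · rintro (⟨h | h⟩ | ⟨seg, hseg, h1, h2⟩)
        · exact Or.inl h
        · exact Or.inr ⟨s, Or.inl rfl, hs, h⟩
        · exact Or.inr ⟨seg, Or.inr hseg, h1, h2⟩
      · rintro (h | ⟨seg, (rfl | hseg), h1, h2⟩)
        · exact Or.inl (Or.inl h)
        · exact Or.inl (Or.inr h2)
        · exact Or.inr ⟨seg, hseg, h1, h2⟩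
    · simp only [hs, List.mem_cons]
      constructor
      · rintro (h | ⟨seg, hseg, h1, h2⟩)
        · exact Or.inl h
        · exact Or.inr ⟨seg, Or.inr hseg, h1, h2⟩
      · rintro (h | ⟨seg, (rfl | hseg), h1, h2⟩)
        · exact Or.inl h
        · exact absurd h1 hs
        · exact Or.inr ⟨seg, hseg, h1, h2⟩

-- A-side, middle fold (over the current meta set)
lemma memMidA (mi : List Int) (acc : PySem.Set Int) (num n : Int) :
    n ∈ mi.foldl (stepCur num) acc
      ↔ n ∈ acc ∨ ∃ cur ∈ mi, ∃ seg ∈ PySem.List.pyRange 0 8 1,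
          get_output ((cur <<< (3:Nat)) + seg) = num ∧ n = (cur <<< (3:Nat)) + seg := by
  induction mi generalizing acc with
  | nil => simp
  | cons c t ih =>
    simp only [List.foldl_cons, ih, stepCur, memInnerA, List.mem_cons]
    constructor
    · rintro ((h | h) | ⟨cur, hc, h⟩)
      · exact Or.inl h
      · exact Or.inr ⟨c, Or.inl rfl, h⟩
      · exact Or.inr ⟨cur, Or.inr hc, h⟩
    · rintro (h | ⟨cur, (rfl | hc), h⟩)
      · exact Or.inl (Or.inl h)
      · exact Or.inl (Or.inr h)
      · exact Or.inr ⟨cur, hc, h⟩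

-- A-side, outer fold: members of the final meta set are exactly the good chains
lemma memOuterA (L : List Int) (S : PySem.Set Int) (n : Int) :
    n ∈ L.foldl stepNum S ↔ ∃ c ∈ S, good L c n := by
  induction L generalizing S with
  | nil => simp [good]
  | cons num t ih =>
    simp only [List.foldl_cons, ih, stepNum, good]
    constructor
    · rintro ⟨c, hc, hg⟩
      rcases (memMidA S PySem.Set.empty num c).mp hc with h | ⟨cur, hcur, seg, hseg, he, rfl⟩
      · simp [PySem.Set.empty] at h
      · exact ⟨cur, hcur, seg, hseg, he, hg⟩
    · rintro ⟨c, hc, seg, hseg, he, hg⟩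
      exact ⟨(c <<< (3:Nat)) + seg,
        (memMidA S PySem.Set.empty num _).mpr (Or.inr ⟨c, hc, seg, hseg, he, rfl⟩), hg⟩

-- B-side fold (over the 8 segments, extending with recursive results)
lemma memFoldB (L : List Int) (init : List Int) (G : Int → List Int) (num cur n : Int) :
    n ∈ L.foldl
        (fun acc seg =>
          let na := (cur <<< (3:Nat)) + seg
          if get_output na = num then acc ++ G ((cur <<< (3:Nat)) + seg) else acc) init
      ↔ n ∈ init ∨ ∃ seg ∈ L, get_output ((cur <<< (3:Nat)) + seg) = num ∧ n ∈ G ((cur <<< (3:Nat)) + seg) := by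
  induction L generalizing init with
  | nil => simp
  | cons s t ih =>
    simp only [List.foldl_cons, ih, List.mem_cons]
    by_cases hs : get_output ((cur <<< (3:Nat)) + s) = num
    · simp only [hs, if_pos, List.mem_append]
      constructor
      · rintro (⟨h | h⟩ | ⟨seg, hseg, h1, h2⟩)
        · exact Or.inl h
        · exact Or.inr ⟨s, Or.inl rfl, hs, h⟩
        · exact Or.inr ⟨seg, Or.inr hseg, h1, h2⟩
      · rintro (h | ⟨seg, (rfl | hseg), h1, h2⟩)
        · exact Or.inl (Or.inl h)
        · exact Or.inl (Or.inr h2)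
        · exact Or.inr ⟨seg, hseg, h1, h2⟩
    · simp only [hs]
      constructor
      · rintro (h | ⟨seg, hseg, h1, h2⟩)
        · exact Or.inl h
        · exact Or.inr ⟨seg, Or.inr hseg, h1, h2⟩
      · rintro (h | ⟨seg, (rfl | hseg), h1, h2⟩)
        · exact Or.inl h
        · exact absurd h1 hs
        · exact Or.inr ⟨seg, hseg, h1, h2⟩

-- B-side: members of findAux are exactly the good chains through the reversed k-prefix
lemma memFindAux (program : List Int) (k : Nat) (hk : k ≤ program.length) (cur n : Int) :
    n ∈ findAux program k cur ↔ good ((program.take k).reverse) cur n := by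
  induction k generalizing cur with
  | zero => simp [findAux, good]
  | succ k ih =>
    have hk' : k < program.length := hk
    have hnum : PySem.List.pyGetD program (k : Int) 0 = program[k] := by
      rw [PySem.List.pyGetD_natCast, List.getD_eq_getElem _ _ hk']
    have htake : (program.take (k+1)).reverse = program[k] :: (program.take k).reverse := by
      rw [List.take_add_one, List.getElem?_eq_getElem hk']
      simp
    rw [htake]
    simp only [findAux, hnum, memFoldB, good]
    constructor
    · rintro (h | ⟨seg, hseg, he, hmem⟩)
      · simp at h
      · exact ⟨seg, hseg, he, (ih (Nat.le_of_lt hk') _).mp hmem⟩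
    · rintro ⟨seg, hseg, he, hg⟩
      exact Or.inr ⟨seg, hseg, he, (ih (Nat.le_of_lt hk') _).mpr hg⟩

-- min of two member-equal Int lists is the same value
lemma min?_congr_mem (xs ys : List Int) (h : ∀ x, x ∈ xs ↔ x ∈ ys) :
    PySem.List.min? xs (fun x => x) = PySem.List.min? ys (fun x => x) := by
  cases hx : PySem.List.min? xs (fun x => x) with
  | none =>
    have hxe : xs = [] := (PySem.List.min?_eq_none_iff _ _).mp hx
    have hye : ys = [] := by
      cases ys with
      | nil => rfl
      | cons y t => exact absurd ((h y).mpr (by simp)) (by simp [hxe])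
    rw [(PySem.List.min?_eq_none_iff _ _).mpr hye]
  | some m =>
    have hmx : m ∈ xs := PySem.List.min?_mem hx
    cases hy : PySem.List.min? ys (fun x => x) with
    | none =>
      have hye : ys = [] := (PySem.List.min?_eq_none_iff _ _).mp hy
      exact absurd ((h m).mp hmx) (by simp [hye])
    | some m' =>
      have hmy : m' ∈ ys := PySem.List.min?_mem hy
      have h1 : m ≤ m' := PySem.List.min?_isMin hx _ ((h m').mpr hmy)
      have h2 : m' ≤ m := PySem.List.min?_isMin hy _ ((h m).mp hmx)
      exact congrArg some (le_antisymm h1 h2)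

-- the two candidate collections have the same members
lemma members_eq (program : List Int) (n : Int) :
    (n ∈ program.reverse.foldl stepNum (PySem.Set.ofList [(0:Int)]))
      ↔ n ∈ findAux program program.length 0 := by
  rw [memOuterA, memFindAux program program.length (le_refl _)]
  simp [PySem.Set.ofList, PySem.Set.add, PySem.Set.empty, List.take_length]

-- ===== VERDICT (by name: the statement is the Claim_ definition above) =====
theorem solve_spec : Claim_equal_solve := by
  intro program a _ _
  unfold Spec_solve solve solve_alt
  simp only
  rw [min?_congr_mem _ _ (members_eq program)]
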